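-- pv_equiv track=rewrite | github.com/AlexVK90/HW_3Python | 3ДЗ.py | negafibonachi
-- ===== SOURCE A (Python) =====
-- def negafibonachi(n):
--     list1 = [0,0]
--     list1[0] = 0
--     list1[1]= 1
--
--     list2= []
--
--     for i in range(2, n +1):
--         x = list1[i-1] + list1[i-2]
--         list1.append(x)
--
--     l = len(list1) -1
--
--     for i in range(len(list1) -1):
--
--         if (l - i) % 2 == 0:
--             j = - list1[l - i]
--             list2.append(j)
--         else:
--             j = list1[l - i]
--             list2.append(j)
--
--     return list2 + list1
-- ===== SOURCE B (Python) =====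
-- def negafibonachi(n):
--     # number of positive-side terms F(0)..F(m-1); A's list always holds at least [0, 1]
--     m = n + 1 if n >= 1 else 2
--     fibs = []
--     a, b = 0, 1
--     for _ in range(m):
--         fibs.append(a)
--         a, b = b, a + b
--     # negafibonacci prefix from its own recurrence F(-(k+2)) = F(-k) - F(-(k+1)),
--     # generated as F(-1), F(-2), ... then reversed so F(-(m-1)) comes first
--     neg = []
--     c, d = 1, -1
--     for _ in range(m - 1):
--         neg.append(c)
--         c, d = d, c - d
--     return neg[::-1] + fibs
-- ===== Notes on version B (the rewrite author's own statement) =====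
-- stated objective: alternative
-- what changed: B replaces A's list-indexing passes (build fib list by indexing back into it, then reflect it by index parity with negation) by two rolling-pair recurrences: the fibonacci terms and the negafibonacci terms are each generated from their own two-variable recurrence, and the negative part is reversed once at the end.
import Mathlib
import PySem

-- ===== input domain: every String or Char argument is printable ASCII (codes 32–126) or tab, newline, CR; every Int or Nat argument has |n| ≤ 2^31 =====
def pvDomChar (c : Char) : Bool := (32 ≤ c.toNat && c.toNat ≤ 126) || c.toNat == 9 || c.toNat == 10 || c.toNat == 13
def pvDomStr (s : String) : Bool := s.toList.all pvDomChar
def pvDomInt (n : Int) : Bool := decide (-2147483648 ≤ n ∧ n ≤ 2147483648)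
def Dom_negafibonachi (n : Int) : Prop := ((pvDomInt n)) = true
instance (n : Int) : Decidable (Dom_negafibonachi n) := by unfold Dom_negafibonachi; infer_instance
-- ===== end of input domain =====

-- B replaces A's index-into-the-list passes by two rolling-pair recurrences (fibonacci up,
-- negafibonacci from its own recurrence, reversed once); alternative decomposition, same cost.

-- ===== PORT A =====
-- list indexing ported with pyGetD: every index A uses (i-1, i-2 with i < len, and l - i with
-- 0 ≤ i < l = len-1) is provably in range, so pyGetD is exact for Python's list[...] here.
def negafibonachi (n : Int) : List Int :=
  let list1 : List Int := [0, 0]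
  let list1 := PySem.List.pySetD list1 0 0
  let list1 := PySem.List.pySetD list1 1 1
  let list2 : List Int := []
  let list1 := (PySem.List.pyRange 2 (n + 1) 1).foldl
    (fun acc i =>
      let x := PySem.List.pyGetD acc (i - 1) 0 + PySem.List.pyGetD acc (i - 2) 0
      acc ++ [x]) list1
  let l : Int := (list1.length : Int) - 1
  let list2 := (PySem.List.pyRange 0 ((list1.length : Int) - 1) 1).foldl
    (fun acc i =>
      if PySem.Int.mod (l - i) 2 == 0 then
        acc ++ [-(PySem.List.pyGetD list1 (l - i) 0)]
      else
        acc ++ [PySem.List.pyGetD list1 (l - i) 0]) list2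
  list2 ++ list1

-- ===== PORT B =====
-- 'for _ in range(k): out.append(a); a, b = b, a + b' as structural recursion on the count
def fibUpAux : Nat → Int → Int → List Int
  | 0, _, _ => []
  | k + 1, a, b => a :: fibUpAux k b (a + b)

-- 'for _ in range(k): neg.append(c); c, d = d, c - d'
def negDownAux : Nat → Int → Int → List Int
  | 0, _, _ => []
  | k + 1, c, d => c :: negDownAux k d (c - d)

def negafibonachi_alt (n : Int) : List Int :=
  let m : Nat := if 1 ≤ n then (n + 1).toNat else 2
  let fibs := fibUpAux m 0 1
  let neg := negDownAux (m - 1) 1 (-1)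
  neg.reverse ++ fibs

-- ===== PRECONDITION & SPEC =====
def Spec_negafibonachi (n : Int) (out : List Int) : Prop := out = negafibonachi_alt n
instance (n : Int) (out : List Int) : Decidable (Spec_negafibonachi n out) := by unfold Spec_negafibonachi; infer_instance

-- ===== CLAIM (what is proved, stated in full; the proofs are below) =====
def Claim_equal_negafibonachi : Prop := ∀ (n : Int), Dom_negafibonachi n → Spec_negafibonachi n (negafibonachi n)

-- ===== LEMMAS AND PROOFS =====

-- mathematical fibonacci over Int
def intfib : Nat → Int
  | 0 => 0
  | 1 => 1
  | k + 2 => intfib k + intfib (k + 1)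

-- negafibonacci F(-j) read off by parity
def nf (j : Nat) : Int := if j % 2 = 0 then -(intfib j) else intfib j

def F (m : Nat) : List Int := (List.range m).map intfib

lemma intfib_rec (k : Nat) : intfib (k + 2) = intfib k + intfib (k + 1) := rfl

lemma nf_rec (j : Nat) : nf (j + 2) = nf j - nf (j + 1) := by
  have h := intfib_rec j
  unfold nf
  rcases Nat.even_or_odd j with hj | hj
  · have h0 : j % 2 = 0 := Nat.even_iff.mp hj
    have h1 : (j + 1) % 2 = 1 := by omega
    have h2 : (j + 2) % 2 = 0 := by omega
    simp [h0, h1, h2]; linarith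
  · have h0 : j % 2 = 1 := Nat.odd_iff.mp hj
    have h1 : (j + 1) % 2 = 0 := by omega
    have h2 : (j + 2) % 2 = 1 := by omega
    simp [h0, h1, h2]; linarith

lemma fibUpAux_eq (k : Nat) : ∀ j : Nat,
    fibUpAux k (intfib j) (intfib (j + 1)) = (List.range k).map (fun t => intfib (j + t)) := by
  induction k with
  | zero => intro j; simp [fibUpAux]
  | succ k ih =>
    intro j
    have h2 : intfib j + intfib (j + 1) = intfib (j + 1 + 1) := (intfib_rec j).symm
    rw [List.range_succ_eq_map]
    simp only [fibUpAux, h2, ih (j + 1), List.map_cons, List.map_map]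
    refine congrArg₂ List.cons (by simp) ?_
    apply List.map_congr_left
    intro t _
    simp only [Function.comp_apply]
    congr 1
    omega

lemma negDownAux_eq (k : Nat) : ∀ j : Nat,
    negDownAux k (nf j) (nf (j + 1)) = (List.range k).map (fun t => nf (j + t)) := by
  induction k with
  | zero => intro j; simp [negDownAux]
  | succ k ih =>
    intro j
    have h2 : nf j - nf (j + 1) = nf (j + 1 + 1) := by rw [nf_rec j]
    rw [List.range_succ_eq_map]
    simp only [negDownAux, h2, ih (j + 1), List.map_cons, List.map_map]
    refine congrArg₂ List.cons (by simp) ?_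
    apply List.map_congr_left
    intro t _
    simp only [Function.comp_apply]
    congr 1
    omega

lemma F_succ (m : Nat) : F (m + 1) = F m ++ [intfib m] := by
  simp [F, List.range_succ]

lemma F_get (m t : Nat) (h : t < m) : PySem.List.pyGetD (F m) (t : Int) 0 = intfib t := by
  rw [PySem.List.pyGetD_natCast]
  simp [F, List.getD, h]

lemma F_length (m : Nat) : (F m).length = m := by simp [F]

-- the first loop of A builds F
lemma loop1_eq (k : Nat) :
    (PySem.List.pyRange 2 (2 + (k : Int)) 1).foldl
      (fun acc i =>
        let x := PySem.List.pyGetD acc (i - 1) 0 + PySem.List.pyGetD acc (i - 2) 0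
        acc ++ [x]) (F 2) = F (2 + k) := by
  induction k with
  | zero => simp [PySem.List.pyRange_one_eq_nil]
  | succ k ih =>
    have hsplit : PySem.List.pyRange 2 (2 + ((k : Int) + 1)) 1 =
        PySem.List.pyRange 2 (2 + (k : Int)) 1 ++ [2 + (k : Int)] := by
      have : (2 : Int) + ((k : Int) + 1) = (2 + (k : Int)) + 1 := by ring
      rw [this, PySem.List.pyRange_one_succ_right (by omega)]
    push_cast
    rw [hsplit, List.foldl_append, ih, List.foldl_cons, List.foldl_nil]
    have e1 : (2 : Int) + (k : Int) - 1 = ((k + 1 : Nat) : Int) := by push_cast; ring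
    have e2 : (2 : Int) + (k : Int) - 2 = ((k : Nat) : Int) := by ring
    have g1 := F_get (2 + k) (k + 1) (by omega)
    have g2 := F_get (2 + k) k (by omega)
    simp only [e1, e2, g1, g2]
    have hsum : intfib (k + 1) + intfib k = intfib (2 + k) := by
      rw [show 2 + k = k + 2 from by omega, intfib_rec]; ring
    rw [hsum, show 2 + (k + 1) = (2 + k) + 1 from by omega, F_succ]

-- A's list1 is F m with m as in B
lemma list1_eq (n : Int) :
    (PySem.List.pyRange 2 (n + 1) 1).foldl
      (fun acc i =>
        let x := PySem.List.pyGetD acc (i - 1) 0 + PySem.List.pyGetD acc (i - 2) 0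
        acc ++ [x])
      (PySem.List.pySetD (PySem.List.pySetD ([0, 0] : List Int) 0 0) 1 1)
      = F (if 1 ≤ n then (n + 1).toNat else 2) := by
  have hinit : PySem.List.pySetD (PySem.List.pySetD ([0, 0] : List Int) 0 0) 1 1 = F 2 := by
    decide
  rw [hinit]
  by_cases h : 1 ≤ n
  · have hk : n + 1 = 2 + ((n - 1).toNat : Int) := by omega
    rw [hk, loop1_eq, if_pos h]
    congr 1
  · rw [PySem.List.pyRange_one_eq_nil (by omega)]
    simp [h]

-- Python's (↑j) % 2 == 0 is Nat parity
lemma mod_two_cast (j : Nat) : (PySem.Int.mod (j : Int) 2 == 0) = (j % 2 == 0) := by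
  have h : PySem.Int.mod (j : Int) 2 = ((j % 2 : Nat) : Int) := by
    exact_mod_cast PySem.Int.mod_natCast j 2
  rw [h]
  rcases Nat.even_or_odd j with hj | hj
  · simp [Nat.even_iff.mp hj]
  · simp [Nat.odd_iff.mp hj]

-- A's second loop produces nf (m-1), nf (m-2), …, nf 1
lemma loop2_eq (m : Nat) (hm : 1 ≤ m) :
    (PySem.List.pyRange 0 (((F m).length : Int) - 1) 1).foldl
      (fun acc i =>
        if PySem.Int.mod (((F m).length : Int) - 1 - i) 2 == 0 then
          acc ++ [-(PySem.List.pyGetD (F m) (((F m).length : Int) - 1 - i) 0)]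
        else
          acc ++ [PySem.List.pyGetD (F m) (((F m).length : Int) - 1 - i) 0]) []
      = (List.range (m - 1)).map (fun t => nf (m - 1 - t)) := by
  have hlen : ((F m).length : Int) = (m : Int) := by rw [F_length]
  rw [hlen]
  have hbody : (fun (acc : List Int) (i : Int) =>
      if PySem.Int.mod ((m : Int) - 1 - i) 2 == 0 then
        acc ++ [-(PySem.List.pyGetD (F m) ((m : Int) - 1 - i) 0)]
      else
        acc ++ [PySem.List.pyGetD (F m) ((m : Int) - 1 - i) 0])
      = (fun acc i => acc ++ [if PySem.Int.mod ((m : Int) - 1 - i) 2 == 0 then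
          -(PySem.List.pyGetD (F m) ((m : Int) - 1 - i) 0)
        else PySem.List.pyGetD (F m) ((m : Int) - 1 - i) 0]) := by
    funext acc i; split <;> rfl
  rw [hbody, PySem.List.foldl_append_singleton_eq_map, List.nil_append,
    PySem.List.pyRange_one]
  have hcount : ((m : Int) - 1 - 0).toNat = m - 1 := by omega
  rw [hcount, List.map_map]
  apply List.map_congr_left
  intro t ht
  have ht' : t < m - 1 := List.mem_range.mp ht
  have hidx : (m : Int) - 1 - (0 + (t : Int)) = ((m - 1 - t : Nat) : Int) := by
    omega
  have hget := F_get m (m - 1 - t) (by omega)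
  simp only [Function.comp, hidx, mod_two_cast, hget]
  unfold nf
  rcases Nat.even_or_odd (m - 1 - t) with hj | hj
  · simp [Nat.even_iff.mp hj]
  · simp [Nat.odd_iff.mp hj]

-- B's reversed negative prefix is the same list
lemma neg_rev_eq (m : Nat) (hm : 1 ≤ m) :
    (negDownAux (m - 1) 1 (-1)).reverse = (List.range (m - 1)).map (fun t => nf (m - 1 - t)) := by
  have e2 : nf (1 + 1) = -1 := by decide
  have e1 : nf 1 = 1 := by decide
  rw [← e2, ← e1, negDownAux_eq (m - 1) 1]
  apply List.ext_getElem
  · simp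
  · intro i h₁ h₂
    have hi : i < m - 1 := by simpa using h₁
    rw [List.getElem_reverse]
    simp only [List.getElem_map, List.getElem_range, List.length_map, List.length_range]
    congr 1
    omega

-- B's positive list is F m
lemma fibs_eq (m : Nat) : fibUpAux m 0 1 = F m := by
  have h0 : (0 : Int) = intfib 0 := rfl
  have h1 : (1 : Int) = intfib 1 := rfl
  rw [h0, h1, fibUpAux_eq m 0]
  simp [F]

-- ===== VERDICT (by name: the statement is the Claim_ definition above) =====
theorem negafibonachi_spec : Claim_equal_negafibonachi := by
  intro n _
  unfold Spec_negafibonachi negafibonachi negafibonachi_alt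
  simp only []
  set m : Nat := if 1 ≤ n then (n + 1).toNat else 2 with hm
  have hm1 : 1 ≤ m := by
    by_cases h : 1 ≤ n
    · simp [hm, h]; omega
    · simp [hm, h]
  rw [list1_eq n, ← hm, loop2_eq m hm1, fibs_eq, neg_rev_eq m hm1]
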